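-- pv_equiv track=rewrite | github.com/YzyLmc/keypoint_detection_methods | hdphmm/run_robomimic.py | labels_to_segments
-- ===== SOURCE A (Python) =====
-- def labels_to_segments(labels):
--     """
--     Convert a per-timestep label array into a dict of {(start, end): state}.
--
--     Args:
--         labels: (T,) integer array of state labels
--
--     Returns:
--         segments: dict mapping (start_time, end_time) -> state_id
--     """
--     segments = {}
--     T = len(labels)
--     seg_start = 0
--     current_state = labels[0]
--
--     for t in range(1, T):
--         if labels[t] != current_state:
--             segments[(int(seg_start), int(t - 1))] = int(current_state)
--             seg_start = t
--             current_state = labels[t]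
--     segments[(int(seg_start), int(T - 1))] = int(current_state)
--     return segments
-- ===== SOURCE B (Python) =====
-- def labels_to_segments(labels):
--     """
--     Convert a per-timestep label array into a dict of {(start, end): state}.
--
--     Boundary-first rewrite: collect the indices where the label changes,
--     then emit one segment per consecutive boundary pair.
--     """
--     T = len(labels)
--     bnds = [0] + [t for t in range(1, T) if labels[t] != labels[t - 1]] + [T]
--     return {(int(s), int(e - 1)): int(labels[s]) for s, e in zip(bnds, bnds[1:])}
-- ===== Notes on version B (the rewrite author's own statement) =====
-- stated objective: idiomatic
-- what changed: Replaced A's single stateful loop (segments dict + seg_start + current_state accumulator) by a two-phase decomposition: first collect the change-point boundaries, then emit one segment per consecutive boundary pair via zip in a dict comprehension.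
import Mathlib
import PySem

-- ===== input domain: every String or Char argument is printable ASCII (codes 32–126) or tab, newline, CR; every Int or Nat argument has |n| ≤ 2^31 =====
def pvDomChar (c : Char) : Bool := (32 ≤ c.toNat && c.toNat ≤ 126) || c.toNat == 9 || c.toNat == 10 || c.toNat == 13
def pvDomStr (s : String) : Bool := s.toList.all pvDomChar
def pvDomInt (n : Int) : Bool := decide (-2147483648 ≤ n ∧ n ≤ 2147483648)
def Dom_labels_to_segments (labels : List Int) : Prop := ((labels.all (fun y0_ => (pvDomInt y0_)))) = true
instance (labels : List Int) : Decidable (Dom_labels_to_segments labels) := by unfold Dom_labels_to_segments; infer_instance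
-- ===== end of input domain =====

-- B emits run-length segments by collecting change-point boundaries first and zipping
-- consecutive pairs (idiomatic two-phase decomposition); return values proved equal on
-- every nonempty list (both Pythons raise IndexError on []).


-- ===== PORT A =====
-- dict assignment d[(a,b)] = v on a dict keyed by int pairs, flattened to (a,b,v) triples:
-- overwrite in place if the key is present, else append (Python dict insertion order).
def pvDinsert (d : List (Int × Int × Int)) (k : Int × Int) (v : Int) : List (Int × Int × Int) :=
  match d with
  | [] => [(k.1, k.2, v)]
  | (a, b, w) :: rest =>
    if a = k.1 ∧ b = k.2 then (a, b, v) :: rest else (a, b, w) :: pvDinsert rest k v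

-- `int(...)` casts are identities on Int and are dropped.
def labels_to_segments (labels : List Int) : List (Int × Int × Int) :=
  match PySem.List.pyGet? labels 0 with
  | none => []   -- labels[0] raises IndexError here; excluded by Pre_
  | some c0 =>
    let T : Int := labels.length
    let st := (PySem.List.pyRange 1 T 1).foldl
      (fun (acc : List (Int × Int × Int) × Int × Int) t =>
        match PySem.List.pyGet? labels t with
        | none => acc   -- unreachable: t < len(labels)
        | some lt =>
          if lt ≠ acc.2.2 then (pvDinsert acc.1 (acc.2.1, t - 1) acc.2.2, t, lt) else acc)
      ([], 0, c0)
    pvDinsert st.1 (st.2.1, T - 1) st.2.2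

-- ===== PORT B =====
-- boundaries, then one segment per consecutive boundary pair; keys of the dict
-- comprehension are pairwise distinct (boundaries strictly increase), so the
-- dict is the list of triples in order.
def labels_to_segments_alt (labels : List Int) : List (Int × Int × Int) :=
  let T : Int := labels.length
  let bnds : List Int :=
    [0] ++ ((PySem.List.pyRange 1 T 1).filter
              (fun t => PySem.List.pyGet? labels t ≠ PySem.List.pyGet? labels (t - 1))) ++ [T]
  (bnds.zip bnds.tail).map
    (fun p => (p.1, p.2 - 1, (PySem.List.pyGet? labels p.1).getD 0))

-- ===== PRECONDITION & SPEC =====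
-- Both Pythons raise IndexError on the empty list (labels[0]); only that input is excluded.
def Pre_labels_to_segments (labels : List Int) : Prop := labels ≠ []
instance (labels : List Int) : Decidable (Pre_labels_to_segments labels) := by
  unfold Pre_labels_to_segments; infer_instance

def pvWitness_labels_to_segments : List Int := [1, 1, 2]

def Spec_labels_to_segments (labels : List Int) (out : List (Int × Int × Int)) : Prop := out = labels_to_segments_alt labels
instance (labels : List Int) (out : List (Int × Int × Int)) : Decidable (Spec_labels_to_segments labels out) := by unfold Spec_labels_to_segments; infer_instance

-- ===== CLAIM (what is proved, stated in full; the proofs are below) =====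
def Claim_equal_labels_to_segments : Prop := ∀ (labels : List Int), Dom_labels_to_segments labels → Pre_labels_to_segments labels → Spec_labels_to_segments labels (labels_to_segments labels)

-- ===== LEMMAS AND PROOFS =====

-- inserting a fresh key is appending
theorem pvDinsert_fresh (d : List (Int × Int × Int)) (k : Int × Int) (v : Int)
    (h : ∀ p ∈ d, p.2.1 ≠ k.2) : pvDinsert d k v = d ++ [(k.1, k.2, v)] := by
  induction d with
  | nil => rfl
  | cons hd tl ih =>
    obtain ⟨a, b, w⟩ := hd
    have hb : b ≠ k.2 := h (a, b, w) (by simp)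
    simp only [pvDinsert]
    rw [if_neg (by tauto)]
    simp [ih (fun p hp => h p (by simp [hp]))]

-- The main loop invariant: with i + n = len(labels), labels[i-1] = labels[s] = c,
-- 0 ≤ s ≤ i - 1, and every segment already emitted ending strictly before s,
-- A's remaining loop + final insert equals segs ++ B's segments for boundaries from s on.
theorem pv_main (labels : List Int) :
    ∀ (n : Nat) (i s c : Int) (segs : List (Int × Int × Int)),
    i + n = labels.length →
    1 ≤ i →
    0 ≤ s → s ≤ i - 1 →
    PySem.List.pyGet? labels (i - 1) = some c →
    PySem.List.pyGet? labels s = some c →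
    (∀ p ∈ segs, p.2.1 < s) →
    (let st := (PySem.List.pyRange i labels.length 1).foldl
        (fun (acc : List (Int × Int × Int) × Int × Int) t =>
          match PySem.List.pyGet? labels t with
          | none => acc
          | some lt =>
            if lt ≠ acc.2.2 then (pvDinsert acc.1 (acc.2.1, t - 1) acc.2.2, t, lt) else acc)
        (segs, s, c);
      pvDinsert st.1 (st.2.1, (labels.length : Int) - 1) st.2.2) =
    segs ++ (((s :: (((PySem.List.pyRange i labels.length 1).filter
                (fun t => PySem.List.pyGet? labels t ≠ PySem.List.pyGet? labels (t - 1)))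
              ++ [(labels.length : Int)])).zip
             (((PySem.List.pyRange i labels.length 1).filter
                (fun t => PySem.List.pyGet? labels t ≠ PySem.List.pyGet? labels (t - 1)))
              ++ [(labels.length : Int)])).map
        (fun p => (p.1, p.2 - 1, (PySem.List.pyGet? labels p.1).getD 0))) := by
  intro n
  induction n with
  | zero =>
    intro i s c segs hiT hi hs0 hsi hc1 hcs hfresh
    have hiT' : i = (labels.length : Int) := by omega
    rw [hiT']
    rw [PySem.List.pyRange_one_eq_nil (le_refl _)]
    simp only [List.foldl_nil, List.filter_nil, List.nil_append]
    rw [pvDinsert_fresh _ _ _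
      (fun p hp => by have := hfresh p hp; show p.2.1 ≠ (labels.length : Int) - 1; omega)]
    simp [List.zip, hcs]
  | succ n ih =>
    intro i s c segs hiT hi hs0 hsi hc1 hcs hfresh
    have hilt : i < (labels.length : Int) := by omega
    rw [PySem.List.pyRange_one_cons hilt]
    have hin : PySem.List.pyGet? labels i = labels[i.toNat]? := by
      apply PySem.List.pyGet?_of_nonneg; omega
    have hlt : i.toNat < labels.length := by omega
    obtain ⟨li, hli⟩ : ∃ li, PySem.List.pyGet? labels i = some li := by
      rw [hin, List.getElem?_eq_getElem hlt]; exact ⟨_, rfl⟩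
    simp only [List.foldl_cons, List.filter_cons, hli]
    by_cases heq : li = c
    · -- no change point at i
      subst heq
      rw [if_neg (by simp), if_neg (by simp [hc1])]
      exact ih (i + 1) s li segs (by omega) (by omega) hs0 (by omega)
        (by simp only [add_sub_cancel_right]; exact hli) hcs hfresh
    · -- change point at i: emit (s, i-1, c), restart run at i
      rw [if_pos heq, if_pos (by simp [hc1, heq])]
      have hstep : pvDinsert segs (s, i - 1) c = segs ++ [(s, i - 1, c)] :=
        pvDinsert_fresh segs (s, i - 1) c
          (fun p hp => by have := hfresh p hp; show p.2.1 ≠ i - 1; omega)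
      rw [hstep]
      have hih := ih (i + 1) i li (segs ++ [(s, i - 1, c)]) (by omega) (by omega) (by omega)
        (by omega) (by simp only [add_sub_cancel_right]; exact hli) hli
        (by
          intro p hp
          rcases List.mem_append.1 hp with h | h
          · have := hfresh p h; omega
          · simp at h; subst h; show i - 1 < i; omega)
      rw [hih, List.append_assoc]
      congr 1
      simp [List.zip_cons_cons, hcs]

-- ===== VERDICT (by name: the statement is the Claim_ definition above) =====
theorem labels_to_segments_spec : Claim_equal_labels_to_segments := by
  intro labels _hdom hpre
  unfold Spec_labels_to_segments labels_to_segments labels_to_segments_alt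
  obtain ⟨c0, ls, rfl⟩ : ∃ c0 ls, labels = c0 :: ls := by
    cases labels with
    | nil => exact absurd rfl hpre
    | cons a l => exact ⟨a, l, rfl⟩
  simp only [PySem.List.pyGet?_zero_cons]
  have hm := pv_main (c0 :: ls) ls.length 1 0 c0 []
    (by simp; omega) (le_refl _) (le_refl _) (by omega)
    (by norm_num [PySem.List.pyGet?_zero_cons])
    (PySem.List.pyGet?_zero_cons c0 ls)
    (by simp)
  simp only [List.nil_append] at hm
  simpa using hm
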